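-- pv_equiv track=rewrite | github.com/iimmuunnee/baekjoon-programmers | 프로그래머스/2/17677. ［1차］ 뉴스 클러스터링/［1차］ 뉴스 클러스터링.py | make_bigrams
-- ===== SOURCE A (Python) =====
-- from collections import Counter
--
-- def make_bigrams(s):
--     s = s.upper()
--     bags = []
--     for i in range(len(s) - 1):
--         a, b = s[i], s[i + 1]
--         if a.isalpha() and b.isalpha():        # 두 글자 모두 알파벳일 때만
--             bags.append(a + b)
--     return Counter(bags)                       # 다중집합
-- ===== SOURCE B (Python) =====
-- from collections import Counter
-- from itertools import groupby
--
--
-- def make_bigrams(s):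
--     counts = Counter()
--     for is_alpha, run in groupby(s.upper(), key=str.isalpha):
--         if is_alpha:
--             chars = list(run)
--             counts.update(a + b for a, b in zip(chars, chars[1:]))
--     return counts
-- ===== Notes on version B (the rewrite author's own statement) =====
-- stated objective: alternative
-- what changed: Instead of scanning index pairs and testing isalpha on both chars of every pair, B splits the upper-cased string into maximal alphabetic runs with itertools.groupby and counts the adjacent bigrams of each alphabetic run directly into a Counter.
import Mathlib
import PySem

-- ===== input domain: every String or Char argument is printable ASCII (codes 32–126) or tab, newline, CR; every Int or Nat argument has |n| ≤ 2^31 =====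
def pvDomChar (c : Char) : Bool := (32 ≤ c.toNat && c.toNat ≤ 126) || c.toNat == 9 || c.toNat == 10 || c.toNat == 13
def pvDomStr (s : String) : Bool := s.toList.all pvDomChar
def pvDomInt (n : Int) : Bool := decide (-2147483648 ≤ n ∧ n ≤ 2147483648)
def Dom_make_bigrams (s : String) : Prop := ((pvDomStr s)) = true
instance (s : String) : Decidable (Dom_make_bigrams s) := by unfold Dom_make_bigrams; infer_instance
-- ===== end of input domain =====

-- B replaces A's indexed scan with isalpha tests on both chars of every pair by
-- splitting the string into maximal alphabetic runs (groupby) and counting each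
-- run's adjacent bigrams; alternative decomposition, same cost.

-- ===== PORT A =====
def make_bigrams (s : String) : List (String × Int) :=
  let t := PySem.Str.upper s
  let bags := (PySem.List.pyRange 0 (PySem.Str.len t - 1) 1).foldl
    (fun bags i =>
      match PySem.Str.pyGet? t i, PySem.Str.pyGet? t (i + 1) with
      | some a, some b =>
        if PySem.Chars.isalpha a && PySem.Chars.isalpha b then
          bags ++ [String.ofList [a, b]]
        else bags
      | _, _ => bags) []
  (PySem.Dict.counter bags).items

-- ===== PORT B =====
-- itertools.groupby(s, key=isalpha): maximal runs of equal isalpha-key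
def pvRuns (cs : List Char) : List (List Char) :=
  match cs with
  | [] => []
  | c :: rest =>
    (c :: rest.takeWhile (fun d => PySem.Chars.isalpha d == PySem.Chars.isalpha c)) ::
      pvRuns (rest.dropWhile (fun d => PySem.Chars.isalpha d == PySem.Chars.isalpha c))
termination_by cs.length
decreasing_by
  have := List.length_dropWhile_le (p := fun d => PySem.Chars.isalpha d == PySem.Chars.isalpha c) (l := rest)
  simp; omega

def make_bigrams_alt (s : String) : List (String × Int) :=
  let cs := (PySem.Str.upper s).toList
  ((pvRuns cs).foldl
    (fun counts run =>
      match run with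
      | [] => counts
      | c :: _ =>
        if PySem.Chars.isalpha c then
          (run.zip run.tail).foldl
            (fun counts p => counts.modify (String.ofList [p.1, p.2]) 0 (· + 1)) counts
        else counts)
    PySem.Dict.empty).items

-- ===== PRECONDITION & SPEC =====
def Spec_make_bigrams (s : String) (out : List (String × Int)) : Prop := out = make_bigrams_alt s
instance (s : String) (out : List (String × Int)) : Decidable (Spec_make_bigrams s out) := by unfold Spec_make_bigrams; infer_instance

-- ===== CLAIM (what is proved, stated in full; the proofs are below) =====
def Claim_equal_make_bigrams : Prop := ∀ (s : String), Dom_make_bigrams s → Spec_make_bigrams s (make_bigrams s)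

-- ===== LEMMAS AND PROOFS =====

-- the bigrams of a char list: adjacent pairs, both alphabetic, as two-char strings
def pvBig (cs : List Char) : List String :=
  ((cs.zip cs.tail).filter (fun p => PySem.Chars.isalpha p.1 && PySem.Chars.isalpha p.2)).map
    (fun p => String.ofList [p.1, p.2])

-- what B flattens: per run, its adjacent pairs if the run is alphabetic
def pvBody (run : List Char) : List String :=
  match run with
  | [] => []
  | c :: _ =>
    if PySem.Chars.isalpha c then (run.zip run.tail).map (fun p => String.ofList [p.1, p.2]) else []

lemma pvBig_cons_cons (a b : Char) (t : List Char) :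
    pvBig (a :: b :: t) =
      (if PySem.Chars.isalpha a && PySem.Chars.isalpha b then [String.ofList [a, b]] else []) ++
        pvBig (b :: t) := by
  simp only [pvBig, List.zip_cons_cons, List.tail_cons, List.filter_cons]
  split_ifs <;> simp

-- core run lemma: a maximal-run prefix splits pvBig
lemma pvBig_run (c : Char) (run rest' : List Char)
    (hrun : ∀ d ∈ run, PySem.Chars.isalpha d = PySem.Chars.isalpha c)
    (hrest : rest' = [] ∨ ∃ d t, rest' = d :: t ∧ PySem.Chars.isalpha d ≠ PySem.Chars.isalpha c) :
    pvBig ((c :: run) ++ rest') = pvBody (c :: run) ++ pvBig rest' := by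
  induction run generalizing c with
  | nil =>
    rcases hrest with h | ⟨d, t, rfl, hd⟩
    · subst h; simp [pvBig, pvBody]
    · have hcd : (PySem.Chars.isalpha c && PySem.Chars.isalpha d) = false := by
        cases hc : PySem.Chars.isalpha c <;> cases hd' : PySem.Chars.isalpha d <;> simp_all
      rw [show (c :: [] : List Char) ++ d :: t = c :: d :: t from rfl, pvBig_cons_cons, hcd]
      simp [pvBody]
  | cons e run' ih =>
    have he : PySem.Chars.isalpha e = PySem.Chars.isalpha c := hrun e (by simp)
    have hrest' : rest' = [] ∨ ∃ d t, rest' = d :: t ∧ PySem.Chars.isalpha d ≠ PySem.Chars.isalpha e := by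
      rcases hrest with h | ⟨d, t, h1, h2⟩
      · exact Or.inl h
      · exact Or.inr ⟨d, t, h1, by rw [he]; exact h2⟩
    have ih' := ih e (fun d hd => by rw [hrun d (by simp [hd]), he]) hrest'
    rw [show (c :: e :: run' : List Char) ++ rest' = c :: (e :: (run' ++ rest')) from rfl,
        pvBig_cons_cons,
        show (e : Char) :: (run' ++ rest') = (e :: run') ++ rest' from rfl, ih']
    cases hc : PySem.Chars.isalpha c
    · simp [pvBody, hc, he]
    · simp [pvBody, hc, he, List.zip_cons_cons]

-- pvRuns flattens back to pvBig
lemma pvBig_eq_flat (cs : List Char) : (pvRuns cs).flatMap pvBody = pvBig cs := by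
  induction cs using pvRuns.induct with
  | case1 => simp [pvRuns, pvBig]
  | case2 c rest ih =>
    rw [pvRuns]
    simp only [List.flatMap_cons, ih]
    have hsplit := List.takeWhile_append_dropWhile
      (p := fun d => PySem.Chars.isalpha d == PySem.Chars.isalpha c) (l := rest)
    conv_rhs => rw [show (c :: rest : List Char) =
      (c :: rest.takeWhile (fun d => PySem.Chars.isalpha d == PySem.Chars.isalpha c)) ++
        rest.dropWhile (fun d => PySem.Chars.isalpha d == PySem.Chars.isalpha c) from by
          rw [List.cons_append, hsplit]]
    rw [pvBig_run]
    · intro d hd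
      have := List.mem_takeWhile_imp hd
      simpa using this
    · cases hdrop : rest.dropWhile (fun d => PySem.Chars.isalpha d == PySem.Chars.isalpha c) with
      | nil => exact Or.inl rfl
      | cons d t =>
        refine Or.inr ⟨d, t, rfl, ?_⟩
        have := List.head_dropWhile_not
          (p := fun d => PySem.Chars.isalpha d == PySem.Chars.isalpha c)
          (l := rest) (by simp [hdrop])
        simp [hdrop] at this
        exact this

-- A's bags list equals pvBig
lemma zip_tail_eq (cs : List Char) :
    cs.zip cs.tail =
      (List.range (cs.length - 1)).map (fun k => (cs.getD k 'A', cs.getD (k + 1) 'A')) := by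
  apply List.ext_getElem
  · simp only [List.length_zip, List.length_tail, List.length_map, List.length_range]
    omega
  · intro i h1 h2
    have hn : i < cs.length - 1 := by simp at h2; omega
    have hi : i < cs.length := by omega
    have hi1 : i + 1 < cs.length := by omega
    simp [List.getElem_zip, List.getElem_tail, hi, hi1]

lemma bags_eq (cs : List Char) :
    (PySem.List.pyRange 0 ((cs.length : Int) - 1) 1).foldl
      (fun bags i =>
        match PySem.List.pyGet? cs i, PySem.List.pyGet? cs (i + 1) with
        | some a, some b =>
          if PySem.Chars.isalpha a && PySem.Chars.isalpha b then
            bags ++ [String.ofList [a, b]]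
          else bags
        | _, _ => bags) [] = pvBig cs := by
  rw [PySem.List.pyRange_one, List.foldl_map]
  have hm : (((cs.length : Int) - 1) - 0).toNat = cs.length - 1 := by omega
  rw [hm]
  rw [PySem.List.foldl_congr_mem
      (g := fun bags k =>
        if PySem.Chars.isalpha (cs.getD k 'A') && PySem.Chars.isalpha (cs.getD (k + 1) 'A') then
          bags ++ [String.ofList [cs.getD k 'A', cs.getD (k + 1) 'A']]
        else bags)
      (h := by
        intro acc k hk
        have hk' : k < cs.length - 1 := List.mem_range.mp hk
        have hi : k < cs.length := by omega
        have hi1 : k + 1 < cs.length := by omega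
        have g1 : PySem.List.pyGet? cs ((0 : Int) + (k : Int)) = some (cs.getD k 'A') := by
          rw [show (0 : Int) + (k : Int) = ((k : Nat) : Int) by omega]
          rw [PySem.List.pyGet?_natCast, List.getElem?_eq_getElem hi, List.getD_eq_getElem _ _ hi]
        have g2 : PySem.List.pyGet? cs ((0 : Int) + (k : Int) + 1) = some (cs.getD (k + 1) 'A') := by
          rw [show (0 : Int) + (k : Int) + 1 = ((k + 1 : Nat) : Int) by omega]
          rw [PySem.List.pyGet?_natCast, List.getElem?_eq_getElem hi1, List.getD_eq_getElem _ _ hi1]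
        simp only [g1, g2])]
  rw [PySem.List.foldl_append_if]
  simp only [List.nil_append, pvBig, zip_tail_eq, List.filter_map, List.map_map]
  rfl

-- B's counting fold is the counter of the flattened bigram list
lemma alt_dict_eq (runs : List (List Char)) (d : PySem.Dict String Int) :
    runs.foldl
      (fun counts run =>
        match run with
        | [] => counts
        | c :: _ =>
          if PySem.Chars.isalpha c then
            (run.zip run.tail).foldl
              (fun counts p => counts.modify (String.ofList [p.1, p.2]) 0 (· + 1)) counts
          else counts) d
    = (runs.flatMap pvBody).foldl (fun counts x => counts.modify x 0 (· + 1)) d := by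
  induction runs generalizing d with
  | nil => rfl
  | cons run rs ih =>
    simp only [List.foldl_cons, List.flatMap_cons, List.foldl_append, ih]
    congr 1
    cases run with
    | nil => rfl
    | cons c t =>
      simp only [pvBody]
      split_ifs with hc
      · rw [List.foldl_map]
      · rfl

-- ===== VERDICT (by name: the statement is the Claim_ definition above) =====
theorem make_bigrams_spec : Claim_equal_make_bigrams := by
  intro s _
  unfold Spec_make_bigrams make_bigrams make_bigrams_alt
  simp only [PySem.Str.pyGet?_eq, PySem.Str.len_eq, PySem.Chars.pyGet?_eq_listPyGet?]
  rw [bags_eq, alt_dict_eq, pvBig_eq_flat, PySem.Dict.counter_eq_foldl]
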